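-- pv_equiv track=rewrite | github.com/robotmlg/aoc | 2025/04/main.py | part2
-- ===== SOURCE A (Python) =====
-- def count_neighbors(row, col, rolls):
--     rows = len(rolls)
--     cols = len(rolls[0])
--
--     on_north_edge = row == 0
--     on_east_edge = col == cols - 1
--     on_south_edge = row == rows - 1
--     on_west_edge = col == 0
--
--     return sum([
--         (not on_north_edge and rolls[row - 1][col]), # north
--         (not on_north_edge and not on_east_edge and rolls[row - 1][col + 1]), # north east
--         (not on_east_edge and rolls[row][col + 1]), # east
--         (not on_south_edge and not on_east_edge and rolls[row + 1][col + 1]), # south east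
--         (not on_south_edge and rolls[row + 1][col]), # south
--         (not on_south_edge and not on_west_edge and rolls[row + 1][col - 1]), # south west
--         (not on_west_edge and rolls[row][col - 1]), # west
--         (not on_north_edge and not on_west_edge and rolls[row - 1][col - 1]), # northwest
--     ])
--
-- def part2(rolls):
--     total = 0
--     new_rolls = rolls
--
--     while True:
--         accessible_grid = [
--             [count_neighbors(row, col, new_rolls) < 4 and new_rolls[row][col]
--             for col in range(len(new_rolls[row]))]
--             for row in range(len(new_rolls))
--         ]
--         accessible = sum([x for row in accessible_grid for x in row])
--         if accessible == 0:
--             break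
--
--         new_rolls = [
--             [
--                 new_rolls[row][col] and not accessible_grid[row][col]
--                 for col in range(len(new_rolls[row]))
--             ]
--             for row in range(len(new_rolls))
--         ]
--
--         total += accessible
--
--     return total
-- ===== SOURCE B (Python) =====
-- DELTAS = [(-1, -1), (-1, 0), (-1, 1), (0, -1), (0, 1), (1, -1), (1, 0), (1, 1)]
--
-- def part2(rolls):
--     R = len(rolls)
--     C = len(rolls[0]) if rolls else 0
--     alive = [list(row) for row in rolls]
--
--     def degree(r, c):
--         d = 0
--         for dr, dc in DELTAS:
--             rr, cc = r + dr, c + dc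
--             if 0 <= rr < R and 0 <= cc < C and alive[rr][cc]:
--                 d += 1
--         return d
--
--     stack = [(r, c) for r in range(R) for c in range(C) if alive[r][c]]
--     removed = 0
--     while stack:
--         r, c = stack.pop()
--         if alive[r][c] and degree(r, c) < 4:
--             alive[r][c] = False
--             removed += 1
--             for dr, dc in DELTAS:
--                 rr, cc = r + dr, c + dc
--                 if 0 <= rr < R and 0 <= cc < C and alive[rr][cc]:
--                     stack.append((rr, cc))
--     return removed
-- ===== Notes on version B (the rewrite author's own statement) =====
-- stated objective: faster
-- what changed: B replaces A's repeated synchronous whole-grid rounds (rebuilding and summing an indicator grid every round) with worklist frontier peeling: each cell is put on a stack once, a popped live cell with fewer than 4 live neighbors is removed immediately and only its 8 neighbors are re-enqueued, so the final grid is the same 4-core but each cell is re-examined only when a neighbor dies.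
import Mathlib
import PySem

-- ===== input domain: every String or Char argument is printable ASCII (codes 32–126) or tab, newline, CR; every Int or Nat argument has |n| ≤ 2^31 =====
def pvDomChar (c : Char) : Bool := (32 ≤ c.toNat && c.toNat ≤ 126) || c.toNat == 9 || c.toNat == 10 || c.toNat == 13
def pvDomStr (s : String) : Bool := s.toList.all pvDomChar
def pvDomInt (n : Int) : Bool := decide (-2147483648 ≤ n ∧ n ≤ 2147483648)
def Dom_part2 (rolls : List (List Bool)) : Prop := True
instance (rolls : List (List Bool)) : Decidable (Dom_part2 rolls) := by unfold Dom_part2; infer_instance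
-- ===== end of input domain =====

-- B replaces A's synchronous whole-grid rounds by worklist frontier peeling (remove a cell
-- as soon as it has fewer than 4 live neighbors, re-enqueue only its neighbors); both end
-- at the same 4-core, so the removal counts agree.  A timing run measured B faster.
-- B does not mutate its argument (it copies the grid); A does not either.

-- ===== PORT A =====
def pvB2i (b : Bool) : Int := if b then 1 else 0

-- rolls[i][j] for in-range Nat indices (A only evaluates a lookup under a guard that
-- puts it in range, so the default is never the value of a guarded term inside Pre_)
def pvLk (g : List (List Bool)) (i j : Nat) : Bool := (g.getD i []).getD j false

def count_neighbors (row col : Nat) (rolls : List (List Bool)) : Int :=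
  let rows := rolls.length
  let cols := (rolls.getD 0 []).length
  let onN : Bool := row == 0
  let onE : Bool := (col : Int) == (cols : Int) - 1
  let onS : Bool := (row : Int) == (rows : Int) - 1
  let onW : Bool := col == 0
  pvB2i (!onN && pvLk rolls (row - 1) col) +
  pvB2i (!onN && !onE && pvLk rolls (row - 1) (col + 1)) +
  pvB2i (!onE && pvLk rolls row (col + 1)) +
  pvB2i (!onS && !onE && pvLk rolls (row + 1) (col + 1)) +
  pvB2i (!onS && pvLk rolls (row + 1) col) +
  pvB2i (!onS && !onW && pvLk rolls (row + 1) (col - 1)) +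
  pvB2i (!onW && pvLk rolls row (col - 1)) +
  pvB2i (!onN && !onW && pvLk rolls (row - 1) (col - 1))

def accGrid (g : List (List Bool)) : List (List Bool) :=
  (List.range g.length).map (fun r =>
    (List.range (g.getD r []).length).map (fun c =>
      decide (count_neighbors r c g < 4) && pvLk g r c))

def newGrid (g acc : List (List Bool)) : List (List Bool) :=
  (List.range g.length).map (fun r =>
    (List.range (g.getD r []).length).map (fun c =>
      pvLk g r c && !(pvLk acc r c)))

def sumGrid (grid : List (List Bool)) : Int :=
  ((grid.flatMap (fun row => row)).map pvB2i).sum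

-- number of true cells (proof-side measure for the while-loops' termination)
def liveN (g : List (List Bool)) : Nat :=
  (g.flatMap (fun row => row)).countP (fun b => b)

-- the while-loop; the fuel argument only bounds the iteration count (liveN g + 1 always
-- suffices, proved below) and never changes the computed value
def loopA (fuel : Nat) (total : Int) (g : List (List Bool)) : Int :=
  match fuel with
  | 0 => total
  | fuel + 1 =>
    let acc := accGrid g
    let a := sumGrid acc
    if a = 0 then total else loopA fuel (total + a) (newGrid g acc)

def part2 (rolls : List (List Bool)) : Int := loopA (liveN rolls + 1) 0 rolls

-- ===== PORT B =====
def pvDeltas : List (Int × Int) :=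
  [(-1, -1), (-1, 0), (-1, 1), (0, -1), (0, 1), (1, -1), (1, 0), (1, 1)]

-- B's degree(r, c): count the live in-range cells among the 8 neighbors
def pvDegree (R C : Int) (alive : List (List Bool)) (r c : Int) : Int :=
  pvDeltas.foldl (fun d p =>
    if 0 ≤ r + p.1 ∧ r + p.1 < R ∧ 0 ≤ c + p.2 ∧ c + p.2 < C ∧
        pvLk alive (r + p.1).toNat (c + p.2).toNat = true
      then d + 1 else d) 0

-- B's initial stack: all live cells, in row-major push order (list head = stack top)
def initStack (R C : Nat) (alive : List (List Bool)) : List (Int × Int) :=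
  (List.range R).foldl (fun st r =>
    (List.range C).foldl (fun st c =>
      if pvLk alive r c = true then ((r : Int), (c : Int)) :: st else st) st) []

-- push all still-live in-range neighbors of the removed cell onto the stack
def pushNbrs (R C : Int) (alive : List (List Bool)) (r c : Int)
    (st0 : List (Int × Int)) : List (Int × Int) :=
  pvDeltas.foldl (fun st p =>
    if 0 ≤ r + p.1 ∧ r + p.1 < R ∧ 0 ≤ c + p.2 ∧ c + p.2 < C ∧
        pvLk alive (r + p.1).toNat (c + p.2).toNat = true
      then (r + p.1, c + p.2) :: st else st) st0

-- the while-loop; the fuel argument only bounds the iteration count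
-- (9 * live cells + stack length + 1 always suffices, proved below)
def loopB (fuel : Nat) (R C : Int) (alive : List (List Bool)) (stack : List (Int × Int))
    (removed : Int) : Int :=
  match fuel, stack with
  | 0, _ => removed
  | _ + 1, [] => removed
  | fuel + 1, (r, c) :: rest =>
    if pvLk alive r.toNat c.toNat = true ∧ pvDegree R C alive r c < 4 then
      loopB fuel R C (alive.modify r.toNat (fun row => row.set c.toNat false))
        (pushNbrs R C (alive.modify r.toNat (fun row => row.set c.toNat false)) r c rest)
        (removed + 1)
    else loopB fuel R C alive rest removed

def part2_alt (rolls : List (List Bool)) : Int :=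
  loopB (9 * liveN rolls + (initStack rolls.length (rolls.getD 0 []).length rolls).length + 1)
    (rolls.length : Int) ((rolls.getD 0 []).length : Int) rolls
    (initStack rolls.length (rolls.getD 0 []).length rolls) 0

-- ===== PRECONDITION & SPEC =====
-- Pre_ requires a rectangular grid: count_neighbors indexes every row by the FIRST row's
-- length, so on every ragged grid A raises IndexError (it returns no value there).
def Pre_part2 (rolls : List (List Bool)) : Prop :=
  ∀ row ∈ rolls, row.length = (rolls.getD 0 []).length
instance (rolls : List (List Bool)) : Decidable (Pre_part2 rolls) := by
  unfold Pre_part2; infer_instance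

def pvWitness_part2 : List (List Bool) := [[true, true], [true, false]]

def Spec_part2 (rolls : List (List Bool)) (out : Int) : Prop := out = part2_alt rolls
instance (rolls : List (List Bool)) (out : Int) : Decidable (Spec_part2 rolls out) := by
  unfold Spec_part2; infer_instance

-- ===== CLAIM (what is proved, stated in full; the proofs are below) =====
def Claim_equal_part2 : Prop := ∀ (rolls : List (List Bool)), Dom_part2 rolls → Pre_part2 rolls → Spec_part2 rolls (part2 rolls)

-- ===== LEMMAS AND PROOFS =====

-- generic counting helpers
theorem getD_range_map {α : Type} (n i : Nat) (f : Nat → α) (d : α) (h : i < n) :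
    ((List.range n).map f).getD i d = f i := by
  rw [List.getD_eq_getElem?_getD, List.getElem?_map, List.getElem?_range h]
  rfl

theorem range_map_getD {α β : Type} (l : List α) (d : α) (F : α → β) :
    (List.range l.length).map (fun i => F (l.getD i d)) = l.map F := by
  induction l with
  | nil => rfl
  | cons a t ih =>
    simp only [List.length_cons, List.range_succ_eq_map, List.map_cons, List.map_map]
    exact congrArg (F a :: ·) (by simpa [Function.comp] using ih)

theorem liveN_cons (row : List Bool) (g : List (List Bool)) :
    liveN (row :: g) = row.countP (fun b => b) + liveN g := by
  simp [liveN, List.countP_append]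

theorem liveN_eq_sum (g : List (List Bool)) :
    liveN g = (g.map (fun row => row.countP (fun b => b))).sum := by
  induction g with
  | nil => rfl
  | cons row t ih => simp [liveN_cons, ih]

theorem sum_map_add_nat {α : Type} (l : List α) (f h : α → Nat) :
    (l.map (fun x => f x + h x)).sum = (l.map f).sum + (l.map h).sum := by
  induction l with
  | nil => rfl
  | cons a t ih => simp [ih]; omega

theorem countP_add_of_pointwise {α : Type} (l : List α) (p q r : α → Bool)
    (h : ∀ x ∈ l, (if p x then 1 else 0) + (if q x then 1 else 0)
        = (if r x then (1 : Nat) else 0)) :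
    l.countP p + l.countP q = l.countP r := by
  induction l with
  | nil => rfl
  | cons a t ih =>
    simp only [List.countP_cons]
    have ha := h a (List.mem_cons_self ..)
    have ht := ih (fun x hx => h x (List.mem_cons_of_mem _ hx))
    omega

theorem row_countP_range (row : List Bool) :
    (List.range row.length).countP (fun c => row.getD c false)
      = row.countP (fun b => b) := by
  induction row with
  | nil => rfl
  | cons a t ih =>
    rw [List.length_cons, List.range_succ_eq_map, List.countP_cons, List.countP_map,
      List.countP_cons]
    have : ((fun c => (a :: t).getD c false) ∘ Nat.succ) = fun c => t.getD c false := by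
      funext c; rfl
    rw [this, ih]
    simp

theorem sum_b2i_eq_countP (l : List Bool) :
    ((l.map pvB2i).sum : Int) = (l.countP (fun b => b) : Nat) := by
  induction l with
  | nil => rfl
  | cons a t ih =>
    cases a <;> simp [pvB2i, List.countP_cons, ih] <;> push_cast <;> omega

theorem pvLk_accGrid (g : List (List Bool)) (r c : Nat) (hr : r < g.length)
    (hc : c < (g.getD r []).length) :
    pvLk (accGrid g) r c = (decide (count_neighbors r c g < 4) && pvLk g r c) := by
  simp only [pvLk, accGrid]
  rw [getD_range_map _ _ _ _ hr, getD_range_map _ _ _ _ hc]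

theorem liveN_newGrid_add (g : List (List Bool)) :
    liveN (newGrid g (accGrid g)) + liveN (accGrid g) = liveN g := by
  have hnew : liveN (newGrid g (accGrid g))
      = ((List.range g.length).map (fun r =>
          (List.range (g.getD r []).length).countP (fun c =>
            pvLk g r c && !(pvLk (accGrid g) r c)))).sum := by
    rw [liveN_eq_sum]
    simp [newGrid, List.map_map, Function.comp_def, List.countP_map]
  have hacc : liveN (accGrid g)
      = ((List.range g.length).map (fun r =>
          (List.range (g.getD r []).length).countP (fun c =>
            decide (count_neighbors r c g < 4) && pvLk g r c))).sum := by
    rw [liveN_eq_sum]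
    simp [accGrid, List.map_map, Function.comp_def, List.countP_map]
  rw [hnew, hacc, ← sum_map_add_nat]
  calc ((List.range g.length).map (fun r =>
          (List.range (g.getD r []).length).countP (fun c =>
            pvLk g r c && !(pvLk (accGrid g) r c)) +
          (List.range (g.getD r []).length).countP (fun c =>
            decide (count_neighbors r c g < 4) && pvLk g r c))).sum
      = ((List.range g.length).map (fun r =>
          (g.getD r []).countP (fun b => b))).sum := by
        refine congrArg _ (List.map_congr_left ?_)
        intro r hr
        have hr' : r < g.length := by simpa using hr
        have hpt : ∀ c ∈ List.range (g.getD r []).length,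
            (if pvLk g r c && !(pvLk (accGrid g) r c) then 1 else 0) +
            (if decide (count_neighbors r c g < 4) && pvLk g r c then 1 else 0)
            = (if pvLk g r c then (1 : Nat) else 0) := by
          intro c hc
          have hc' : c < (g.getD r []).length := by simpa using hc
          rw [pvLk_accGrid g r c hr' hc']
          cases pvLk g r c <;> cases decide (count_neighbors r c g < 4) <;> simp
        rw [countP_add_of_pointwise _ _ _ _ hpt]
        have := row_countP_range (g.getD r [])
        simpa [pvLk] using this
    _ = (g.map (fun row => row.countP (fun b => b))).sum := by
        rw [range_map_getD g ([] : List Bool) (fun row => row.countP (fun b => b))]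
    _ = liveN g := (liveN_eq_sum g).symm

theorem sumGrid_eq_liveN (grid : List (List Bool)) :
    sumGrid grid = (liveN grid : Int) := by
  simpa [sumGrid, liveN] using sum_b2i_eq_countP (grid.flatMap (fun row => row))

theorem countP_set_false (l : List Bool) (c : Nat) (h : l.getD c false = true) :
    (l.set c false).countP (fun b => b) + 1 = l.countP (fun b => b) := by
  induction l generalizing c with
  | nil => simp at h
  | cons a t ih =>
    cases c with
    | zero =>
      simp only [List.getD_cons_zero] at h
      simp [h, List.countP_cons]
    | succ c =>
      have := ih c (by simpa using h)
      simp only [List.set_cons_succ, List.countP_cons]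
      omega

theorem liveN_modify (g : List (List Bool)) (r c : Nat) (h : pvLk g r c = true) :
    liveN (g.modify r (fun row => row.set c false)) + 1 = liveN g := by
  induction g generalizing r with
  | nil => simp [pvLk] at h
  | cons row t ih =>
    cases r with
    | zero =>
      have h' : row.getD c false = true := by simpa [pvLk] using h
      rw [show (row :: t).modify 0 (fun row => row.set c false)
          = row.set c false :: t from by simp [List.modify]]
      rw [liveN_cons, liveN_cons]
      have := countP_set_false row c h'
      omega
    | succ r =>
      have h' : pvLk t r c = true := by simpa [pvLk] using h
      have := ih r h'
      rw [show (row :: t).modify (r + 1) (fun row => row.set c false)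
          = row :: t.modify r (fun row => row.set c false) from by simp [List.modify]]
      rw [liveN_cons, liveN_cons]
      omega

theorem foldl_len_le {α β : Type} (F : List β → α → List β)
    (h : ∀ s e, (F s e).length ≤ s.length + 1) :
    ∀ (ds : List α) (st : List β), (ds.foldl F st).length ≤ st.length + ds.length := by
  intro ds
  induction ds with
  | nil => intro st; simp
  | cons e tl ih =>
    intro st
    have h1 := ih (F st e)
    have h2 := h st e
    simp only [List.foldl_cons, List.length_cons]
    omega


theorem pushNbrs_len (R C : Int) (alive : List (List Bool)) (r c : Int)
    (st0 : List (Int × Int)) : (pushNbrs R C alive r c st0).length ≤ st0.length + 8 := by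
  have h := foldl_len_le
    (fun st (p : Int × Int) =>
      if 0 ≤ r + p.1 ∧ r + p.1 < R ∧ 0 ≤ c + p.2 ∧ c + p.2 < C ∧
          pvLk alive (r + p.1).toNat (c + p.2).toNat = true
        then (r + p.1, c + p.2) :: st else st)
    (by intro s e; dsimp only; split <;> simp) pvDeltas st0
  simpa [pushNbrs] using h


-- proof-side model of the erosion: A's synchronous fixpoint ("the 4-core")
def pvAlive (g : List (List Bool)) (i j : Int) : Bool :=
  decide (0 ≤ i) && decide (i < (g.length : Int)) &&
  decide (0 ≤ j) && decide (j < ((g.getD i.toNat []).length : Int)) &&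
  pvLk g i.toNat j.toNat

def pvCount (g : List (List Bool)) (r c : Int) : Int :=
  pvDeltas.foldl (fun s d => s + (if pvAlive g (r + d.1) (c + d.2) then 1 else 0)) 0

def pvStep (g : List (List Bool)) : List (List Bool) :=
  (PySem.List.enumerate g).map (fun p =>
    (PySem.List.enumerate p.2).map (fun q =>
      q.2 && decide ((4 : Int) ≤ pvCount g p.1 q.1)))

theorem row_mask (row : List Bool) (f : Int → Bool) (s : Int) :
    ((PySem.List.enumerate row s).map (fun q => q.2 && f q.1)).countP (fun b => b)
        ≤ row.countP (fun b => b)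
    ∧ (((PySem.List.enumerate row s).map (fun q => q.2 && f q.1)).countP (fun b => b)
          = row.countP (fun b => b)
        → ((PySem.List.enumerate row s).map (fun q => q.2 && f q.1)) = row) := by
  induction row generalizing s with
  | nil => simp [PySem.List.enumerate_nil]
  | cons a t ih =>
    simp only [PySem.List.enumerate_cons, List.map_cons, List.countP_cons]
    obtain ⟨ihle, iheq⟩ := ih (s + 1)
    have hhead : (if (a && f s) = true then 1 else 0) ≤ if a = true then (1 : Nat) else 0 := by
      cases a <;> cases f s <;> simp
    refine ⟨by omega, ?_⟩
    intro h
    have h2 : ((PySem.List.enumerate t (s + 1)).map (fun q => q.2 && f q.1)).countP (fun b => b)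
        = t.countP (fun b => b) := by omega
    rw [iheq h2]
    have : (a && f s) = a := by
      cases a <;> cases hfs : f s <;> simp_all
    rw [this]

theorem grid_mask (g0 : List (List Bool)) (F : Int → Int → Bool) (s : Int) :
    liveN ((PySem.List.enumerate g0 s).map (fun p =>
        (PySem.List.enumerate p.2).map (fun q => q.2 && F p.1 q.1))) ≤ liveN g0
    ∧ (liveN ((PySem.List.enumerate g0 s).map (fun p =>
          (PySem.List.enumerate p.2).map (fun q => q.2 && F p.1 q.1))) = liveN g0
        → ((PySem.List.enumerate g0 s).map (fun p =>
            (PySem.List.enumerate p.2).map (fun q => q.2 && F p.1 q.1))) = g0) := by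
  induction g0 generalizing s with
  | nil => simp [PySem.List.enumerate_nil, liveN]
  | cons row t ih =>
    simp only [PySem.List.enumerate_cons, List.map_cons, liveN_cons]
    obtain ⟨ihle, iheq⟩ := ih (s + 1)
    obtain ⟨rle, req⟩ := row_mask row (F s) 0
    refine ⟨by omega, ?_⟩
    intro h
    have h2 : liveN ((PySem.List.enumerate t (s + 1)).map (fun p =>
        (PySem.List.enumerate p.2).map (fun q => q.2 && F p.1 q.1))) = liveN t := by omega
    rw [iheq h2, req (by omega)]

theorem liveN_pvStep_lt (g : List (List Bool)) (h : pvStep g ≠ g) :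
    liveN (pvStep g) < liveN g := by
  obtain ⟨hle, heq⟩ := grid_mask g (fun r c => decide ((4 : Int) ≤ pvCount g r c)) 0
  by_contra hlt
  exact h (heq (by unfold pvStep at *; omega))

def pvErode (g : List (List Bool)) : List (List Bool) :=
  let ng := pvStep g
  if ng = g then g else pvErode ng
termination_by liveN g
decreasing_by exact liveN_pvStep_lt g (by assumption)

def pvSumRow (row : List Bool) : Int := (row.map pvB2i).sum

def pvLive (g : List (List Bool)) : Int := (g.map pvSumRow).sum

theorem range_map_getD_id (l : List Bool) :
    (List.range l.length).map (fun c => l.getD c false) = l := by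
  simpa using range_map_getD l false id

theorem pvLive_eq (g : List (List Bool)) : pvLive g = (liveN g : Int) := by
  induction g with
  | nil => rfl
  | cons row t ih =>
    simp only [pvLive, List.map_cons, List.sum_cons, liveN_cons, pvSumRow] at *
    rw [sum_b2i_eq_countP, ih]
    push_cast
    ring

theorem rect_row_len (g : List (List Bool)) (h : Pre_part2 g) (r : Nat)
    (hr : r < g.length) : (g.getD r []).length = (g.getD 0 []).length := by
  apply h
  rw [List.getD_eq_getElem g [] hr]
  exact List.getElem_mem hr

theorem pvLk_false_of_liveN_zero (G : List (List Bool)) (h : liveN G = 0)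
    (r c : Nat) : pvLk G r c = false := by
  unfold liveN at h
  rw [List.countP_eq_zero] at h
  unfold pvLk
  by_cases hr : r < G.length
  · by_cases hc : c < (G.getD r []).length
    · rw [List.getD_eq_getElem _ _ hc]
      by_contra hx
      refine h _ (List.mem_flatMap.2 ⟨G.getD r [], ?_, List.getElem_mem hc⟩) (by simpa using hx)
      rw [List.getD_eq_getElem G [] hr]
      exact List.getElem_mem hr
    · exact List.getD_eq_default _ _ (by omega)
  · rw [show G.getD r [] = [] from List.getD_eq_default _ _ (by omega)]
    rfl

theorem newGrid_of_acc_zero (g : List (List Bool)) (h : liveN (accGrid g) = 0) :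
    newGrid g (accGrid g) = g := by
  unfold newGrid
  apply List.ext_getElem (by simp)
  intro r h1 h2
  rw [List.getElem_map, List.getElem_range]
  have : ∀ c, pvLk (accGrid g) r c = false := fun c => pvLk_false_of_liveN_zero _ h r c
  calc (List.range (g.getD r []).length).map (fun c => pvLk g r c && !pvLk (accGrid g) r c)
      = (List.range (g.getD r []).length).map (fun c => (g.getD r []).getD c false) := by
        apply List.map_congr_left
        intro c _
        rw [this c]
        simp [pvLk]
    _ = g.getD r [] := range_map_getD_id _
    _ = g[r] := List.getD_eq_getElem g [] (by simpa using h2)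

theorem rect_newGrid (g : List (List Bool)) (h : Pre_part2 g) :
    Pre_part2 (newGrid g (accGrid g)) := by
  intro row hrow
  unfold newGrid at hrow ⊢
  rcases List.mem_map.1 hrow with ⟨r, hr, rfl⟩
  have hr' : r < g.length := by simpa using hr
  have hg0 : 0 < g.length := by omega
  rw [getD_range_map _ _ _ _ hg0]
  simp only [List.length_map, List.length_range]
  exact (rect_row_len g h r hr').trans (rect_row_len g h 0 hg0).symm

theorem pvAlive_eq (g : List (List Bool)) (h : Pre_part2 g) (i j : Int) :
    pvAlive g i j
      = (decide (0 ≤ i) && decide (i < (g.length : Int)) && decide (0 ≤ j) &&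
          decide (j < ((g.getD 0 []).length : Int)) && pvLk g i.toNat j.toNat) := by
  unfold pvAlive
  by_cases h1 : 0 ≤ i
  · by_cases h2 : i < (g.length : Int)
    · have : (g.getD i.toNat []).length = (g.getD 0 []).length :=
        rect_row_len g h i.toNat (by omega)
      rw [this]
    · simp [h2]
  · simp [h1]

theorem count_eq (g : List (List Bool)) (h : Pre_part2 g) (r c : Nat)
    (hr : r < g.length) (hc : c < (g.getD 0 []).length) :
    pvCount g (r : Int) (c : Int) = count_neighbors r c g := by
  have hrL : ((r : Int)) < (g.length : Int) := by exact_mod_cast hr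
  have hcC : ((c : Int)) < ((g.getD 0 []).length : Int) := by exact_mod_cast hc
  have d1 : decide (0 ≤ (r : Int) + -1) = !(r == 0) := by
    by_cases h0 : r = 0
    · subst h0
      simp only [beq_self_eq_true, Bool.not_true, decide_eq_false_iff_not]
      omega
    · simp only [show (r == 0) = false from beq_eq_false_iff_ne.mpr h0,
        Bool.not_false, decide_eq_true_eq]
      omega
  have d2 : decide ((r : Int) + -1 < (g.length : Int)) = true := by
    simp only [decide_eq_true_eq]; omega
  have d3 : decide ((r : Int) + 1 < (g.length : Int))
      = !((r : Int) == (g.length : Int) - 1) := by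
    by_cases hS : (r : Int) = (g.length : Int) - 1
    · simp only [show ((r : Int) == (g.length : Int) - 1) = true from
          beq_iff_eq.mpr hS, Bool.not_true, decide_eq_false_iff_not]
      omega
    · simp only [show ((r : Int) == (g.length : Int) - 1) = false from
          beq_eq_false_iff_ne.mpr hS, Bool.not_false, decide_eq_true_eq]
      omega
  have d4 : decide (0 ≤ (r : Int) + 1) = true := by
    simp only [decide_eq_true_eq]; omega
  have d5 : decide ((r : Int) < (g.length : Int)) = true := by
    simp only [decide_eq_true_eq]; omega
  have d6 : decide (0 ≤ (r : Int)) = true := by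
    simp only [decide_eq_true_eq]; omega
  have e1 : decide (0 ≤ (c : Int) + -1) = !(c == 0) := by
    by_cases h0 : c = 0
    · subst h0
      simp only [beq_self_eq_true, Bool.not_true, decide_eq_false_iff_not]
      omega
    · simp only [show (c == 0) = false from beq_eq_false_iff_ne.mpr h0,
        Bool.not_false, decide_eq_true_eq]
      omega
  have e2 : decide ((c : Int) + -1 < ((g.getD 0 []).length : Int)) = true := by
    simp only [decide_eq_true_eq]; omega
  have e3 : decide ((c : Int) + 1 < ((g.getD 0 []).length : Int))
      = !((c : Int) == ((g.getD 0 []).length : Int) - 1) := by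
    by_cases hE : (c : Int) = ((g.getD 0 []).length : Int) - 1
    · simp only [show ((c : Int) == ((g.getD 0 []).length : Int) - 1) = true from
          beq_iff_eq.mpr hE, Bool.not_true, decide_eq_false_iff_not]
      omega
    · simp only [show ((c : Int) == ((g.getD 0 []).length : Int) - 1) = false from
          beq_eq_false_iff_ne.mpr hE, Bool.not_false, decide_eq_true_eq]
      omega
  have e4 : decide (0 ≤ (c : Int) + 1) = true := by
    simp only [decide_eq_true_eq]; omega
  have e5 : decide ((c : Int) < ((g.getD 0 []).length : Int)) = true := by
    simp only [decide_eq_true_eq]; omega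
  have e6 : decide (0 ≤ (c : Int)) = true := by
    simp only [decide_eq_true_eq]; omega
  have a1 : ((r : Int) + -1).toNat = r - 1 := by omega
  have a2 : ((r : Int) + 1).toNat = r + 1 := by omega
  have a3 : ((c : Int) + -1).toNat = c - 1 := by omega
  have a4 : ((c : Int) + 1).toNat = c + 1 := by omega
  simp only [pvCount, pvDeltas, List.foldl_cons, List.foldl_nil, pvAlive_eq g h,
    add_zero, count_neighbors, pvB2i, d1, d2, d3, d4, d5, d6, e1, e2, e3, e4, e5, e6,
    a1, a2, a3, a4, Int.toNat_natCast, Bool.and_true, Bool.true_and, Bool.and_assoc]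
  ring

theorem step_eq (g : List (List Bool)) (h : Pre_part2 g) :
    pvStep g = newGrid g (accGrid g) := by
  apply List.ext_getElem (by simp [pvStep, newGrid, PySem.List.length_enumerate])
  intro r h1 h2
  have hr : r < g.length := by
    simpa [pvStep, PySem.List.length_enumerate] using h1
  have hgr : g.getD r [] = g[r] := List.getD_eq_getElem g [] hr
  have hrowL : (pvStep g)[r]'h1
      = (PySem.List.enumerate g[r]).map (fun q =>
          q.2 && decide ((4 : Int) ≤ pvCount g ((0 : Int) + (r : Int)) q.1)) := by
    simp [pvStep, PySem.List.getElem_enumerate]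
  have hrowR : (newGrid g (accGrid g))[r]'h2
      = (List.range (g.getD r []).length).map (fun c =>
          pvLk g r c && !pvLk (accGrid g) r c) := by
    simp [newGrid]
  rw [hrowL, hrowR]
  apply List.ext_getElem (by simp [PySem.List.length_enumerate, List.getElem?_eq_getElem hr])
  intro c hc1 hc2
  have hc : c < g[r].length := by
    simpa [PySem.List.length_enumerate] using hc1
  have hc' : c < (g.getD r []).length := by rwa [hgr]
  have hcC : c < (g.getD 0 []).length := by rwa [rect_row_len g h r hr] at hc'
  rw [List.getElem_map, List.getElem_map, List.getElem_range,
    PySem.List.getElem_enumerate]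
  have hcount : pvCount g ((0 : Int) + (r : Int)) ((0 : Int) + (c : Int))
      = count_neighbors r c g := by
    simpa using count_eq g h r c hr hcC
  have hlk : pvLk g r c = g[r][c] := by
    simp [pvLk, List.getElem?_eq_getElem hr, List.getElem?_eq_getElem hc]
  simp only [hcount, pvLk_accGrid g r c hr hc', hlk]
  cases hx : g[r][c]
  · simp
  · simp only [Bool.true_and, Bool.and_true]
    by_cases h4 : count_neighbors r c g < 4
    · simp [h4, show ¬((4 : Int) ≤ count_neighbors r c g) from by omega]
    · simp [h4, show ((4 : Int) ≤ count_neighbors r c g) from by omega]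

theorem main_loop : ∀ (fuel : Nat) (g : List (List Bool)), Pre_part2 g → liveN g < fuel →
    ∀ total : Int, loopA fuel total g = total + pvLive g - pvLive (pvErode g) := by
  intro fuel
  induction fuel with
  | zero => intro g _ hN; omega
  | succ N ih =>
    intro g hrect hN total
    rw [loopA]
    have hs := sumGrid_eq_liveN (accGrid g)
    have hadd := liveN_newGrid_add g
    by_cases ha : sumGrid (accGrid g) = 0
    · rw [if_pos ha]
      have hacc0 : liveN (accGrid g) = 0 := by rw [hs] at ha; exact_mod_cast ha
      have hng : pvStep g = g := (step_eq g hrect).trans (newGrid_of_acc_zero g hacc0)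
      have he : pvErode g = g := by rw [pvErode]; simp [hng]
      rw [he]; ring
    · rw [if_neg ha]
      have hacc0 : liveN (accGrid g) ≠ 0 := by
        intro hz; exact ha (by rw [hs, hz]; rfl)
      have hlt : liveN (newGrid g (accGrid g)) < liveN g := by omega
      rw [ih (newGrid g (accGrid g)) (rect_newGrid g hrect) (by omega) _]
      have hane : newGrid g (accGrid g) ≠ g := by
        intro he
        rw [he] at hadd
        omega
      have herode : pvErode g = pvErode (newGrid g (accGrid g)) := by
        rw [pvErode]
        simp only [step_eq g hrect]
        rw [if_neg hane]
      rw [herode]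
      have h1 := pvLive_eq g
      have h2 := pvLive_eq (newGrid g (accGrid g))
      rw [hs] at *
      omega

-- ===== B-side development: worklist peeling reaches the same 4-core =====

def ShapeG (n m : Nat) (g : List (List Bool)) : Prop :=
  g.length = n ∧ ∀ row ∈ g, row.length = m

def LeG (g h : List (List Bool)) : Prop :=
  ∀ r c : Nat, pvLk g r c = true → pvLk h r c = true

def ClosedG (g : List (List Bool)) : Prop :=
  ∀ r c : Nat, pvLk g r c = true → 4 ≤ pvCount g (r : Int) (c : Int)

theorem pvLk_bounds (g : List (List Bool)) (r c : Nat) (h : pvLk g r c = true) :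
    r < g.length ∧ c < (g.getD r []).length := by
  constructor
  · by_contra hx
    unfold pvLk at h
    rw [show g.getD r [] = ([] : List Bool) from List.getD_eq_default _ _ (by omega)] at h
    simp at h
  · by_contra hx
    unfold pvLk at h
    rw [List.getD_eq_default _ _ (by omega)] at h
    simp at h

theorem shape_row_len (n m : Nat) (g : List (List Bool)) (hs : ShapeG n m g)
    (r : Nat) (hr : r < n) : (g.getD r []).length = m := by
  have hl : r < g.length := by rw [hs.1]; exact hr
  apply hs.2
  rw [List.getD_eq_getElem g [] hl]
  exact List.getElem_mem _

theorem pvAlive_char (g : List (List Bool)) (i j : Int) :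
    pvAlive g i j = (decide (0 ≤ i) && decide (0 ≤ j) && pvLk g i.toNat j.toNat) := by
  unfold pvAlive
  by_cases h1 : 0 ≤ i
  · by_cases h2 : i < (g.length : Int)
    · by_cases h3 : 0 ≤ j
      · by_cases h4 : j < ((g.getD i.toNat []).length : Int)
        · have hg : g.getD i.toNat [] = g[i.toNat]'(by omega) :=
            List.getD_eq_getElem _ _ _
          simp [h1, h2, h3, h4]
          intro _
          rw [← hg]
          exact_mod_cast h4
        · have : pvLk g i.toNat j.toNat = false := by
            unfold pvLk
            rw [List.getD_eq_default _ _ (by omega)]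
          simp [h1, h2, h3, h4, this]
      · simp [h3]
    · have : pvLk g i.toNat j.toNat = false := by
        unfold pvLk
        rw [show g.getD i.toNat [] = [] from List.getD_eq_default _ _ (by omega)]
        rfl
      simp [h2, this]
  · simp [h1]

theorem foldl_count_le {α : Type} (ds : List α) (p q : α → Bool)
    (h : ∀ d ∈ ds, p d = true → q d = true) :
    ∀ a b : Int, a ≤ b →
      ds.foldl (fun s d => s + if p d then 1 else 0) a
        ≤ ds.foldl (fun s d => s + if q d then 1 else 0) b := by
  induction ds with
  | nil => intro a b hab; simpa using hab
  | cons e tl ih =>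
    intro a b hab
    simp only [List.foldl_cons]
    apply ih (fun d hd => h d (List.mem_cons_of_mem _ hd))
    by_cases hp : p e = true
    · have hq := h e (List.mem_cons_self ..) hp
      rw [if_pos hp, if_pos hq]
      omega
    · rw [if_neg hp]
      have h2 : (0 : Int) ≤ if q e = true then 1 else 0 := by split <;> omega
      omega

theorem foldl_count_congr {α : Type} (ds : List α) (p q : α → Bool)
    (h : ∀ d ∈ ds, p d = q d) :
    ∀ a : Int, ds.foldl (fun s d => s + if p d then 1 else 0) a
      = ds.foldl (fun s d => s + if q d then 1 else 0) a := by
  induction ds with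
  | nil => intro a; rfl
  | cons e tl ih =>
    intro a
    simp only [List.foldl_cons, h e (List.mem_cons_self ..)]
    exact ih (fun d hd => h d (List.mem_cons_of_mem _ hd)) _

theorem pvCount_mono (g h : List (List Bool)) (hle : LeG g h) (i j : Int) :
    pvCount g i j ≤ pvCount h i j := by
  apply foldl_count_le _ _ _ _ 0 0 le_rfl
  intro d _ hd
  rw [pvAlive_char] at hd ⊢
  simp only [Bool.and_eq_true, decide_eq_true_eq] at hd ⊢
  exact ⟨hd.1, hle _ _ hd.2⟩

theorem foldl_deg_count {α : Type} (ds : List α) (P : α → Prop) [DecidablePred P]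
    (q : α → Bool) (h : ∀ d ∈ ds, P d ↔ q d = true) :
    ∀ a : Int, ds.foldl (fun s d => if P d then s + 1 else s) a
      = ds.foldl (fun s d => s + if q d then 1 else 0) a := by
  induction ds with
  | nil => intro a; rfl
  | cons e tl ih =>
    intro a
    simp only [List.foldl_cons]
    have he := h e (List.mem_cons_self ..)
    have hrest := ih (fun d hd => h d (List.mem_cons_of_mem _ hd))
    by_cases hp : P e
    · rw [if_pos hp, if_pos (he.mp hp), hrest]
    · rw [if_neg hp, if_neg (fun hq => hp (he.mpr hq))]
      simpa using hrest _

theorem pvDegree_eq (n m : Nat) (g : List (List Bool)) (hs : ShapeG n m g)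
    (r c : Int) : pvDegree (n : Int) (m : Int) g r c = pvCount g r c := by
  unfold pvDegree pvCount
  apply foldl_deg_count
  intro d _
  rw [pvAlive_char]
  simp only [Bool.and_eq_true, decide_eq_true_eq]
  constructor
  · rintro ⟨h1, _, h3, _, h5⟩
    exact ⟨⟨h1, h3⟩, h5⟩
  · rintro ⟨⟨h1, h3⟩, h5⟩
    obtain ⟨hb1, hb2⟩ := pvLk_bounds _ _ _ h5
    refine ⟨h1, ?_, h3, ?_, h5⟩
    · rw [hs.1] at hb1; omega
    · rw [shape_row_len n m g hs _ (by rw [hs.1] at hb1; omega)] at hb2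
      omega

-- lookups after B's in-place removal
theorem pvLk_modify_set (g : List (List Bool)) (rn cn r c : Nat) :
    pvLk (g.modify rn (fun row => row.set cn false)) r c
      = if r = rn ∧ c = cn then false else pvLk g r c := by
  unfold pvLk
  by_cases hrl : r < g.length
  · have hrl' : r < (g.modify rn (fun row => row.set cn false)).length := by
      simpa [List.length_modify] using hrl
    rw [List.getD_eq_getElem _ [] hrl', List.getElem_modify]
    by_cases hr : rn = r
    · rw [if_pos hr]
      subst hr
      rw [List.getD_eq_getElem?_getD, List.getElem?_set]
      by_cases hc : cn = c
      · subst hc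
        have hR : (if rn = rn ∧ cn = cn then false
            else (g.getD rn []).getD cn false) = false := if_pos ⟨rfl, rfl⟩
        rw [hR, if_pos rfl]
        split <;> rfl
      · rw [if_neg hc, if_neg (fun h => hc h.2.symm),
          List.getD_eq_getElem g [] hrl, List.getD_eq_getElem?_getD]
    · rw [if_neg hr, if_neg (fun h => hr h.1.symm), List.getD_eq_getElem g [] hrl]
  · have e1 : (g.modify rn (fun row => row.set cn false)).getD r [] = [] :=
      List.getD_eq_default _ _ (by rw [List.length_modify]; omega)
    have e2 : g.getD r [] = [] := List.getD_eq_default _ _ (by omega)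
    rw [e1, e2]
    split <;> rfl

theorem pvAlive_modify (g : List (List Bool)) (rn cn : Nat) (i j : Int)
    (hne : ¬(i = (rn : Int) ∧ j = (cn : Int))) :
    pvAlive (g.modify rn (fun row => row.set cn false)) i j = pvAlive g i j := by
  rw [pvAlive_char, pvAlive_char]
  by_cases h1 : 0 ≤ i
  · by_cases h2 : 0 ≤ j
    · rw [pvLk_modify_set, if_neg]
      intro ⟨ha, hb⟩
      exact hne ⟨by omega, by omega⟩
    · simp [h2]
  · simp [h1]

theorem pvCount_modify_eq (g : List (List Bool)) (rn cn : Nat) (x y : Int)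
    (hnd : ∀ d ∈ pvDeltas, ¬(x + d.1 = (rn : Int) ∧ y + d.2 = (cn : Int))) :
    pvCount (g.modify rn (fun row => row.set cn false)) x y = pvCount g x y := by
  unfold pvCount
  apply foldl_count_congr
  intro d hd
  exact pvAlive_modify g rn cn _ _ (hnd d hd)

-- entry-level description of one synchronous step (no rectangularity needed)
theorem length_pvStep (g : List (List Bool)) : (pvStep g).length = g.length := by
  simp [pvStep, PySem.List.length_enumerate]

theorem pvStep_row (g : List (List Bool)) (r : Nat) (hr : r < g.length) :
    (pvStep g)[r]'(by rw [length_pvStep]; exact hr)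
      = (PySem.List.enumerate (g[r]'hr)).map (fun q =>
          q.2 && decide ((4 : Int) ≤ pvCount g ((0 : Int) + (r : Int)) q.1)) := by
  simp [pvStep, PySem.List.getElem_enumerate]

theorem pvStep_shape (n m : Nat) (g : List (List Bool)) (hs : ShapeG n m g) :
    ShapeG n m (pvStep g) := by
  refine ⟨by rw [length_pvStep]; exact hs.1, ?_⟩
  intro row hrow
  rcases List.mem_iff_getElem.mp hrow with ⟨r, hr, rfl⟩
  have hr' : r < g.length := by rwa [length_pvStep] at hr
  rw [pvStep_row g r hr']
  simp only [List.length_map, PySem.List.length_enumerate]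
  exact hs.2 _ (List.getElem_mem hr')

theorem pvLk_getElem (g : List (List Bool)) (r c : Nat) (hr : r < g.length)
    (hc : c < (g[r]'hr).length) : pvLk g r c = (g[r]'hr)[c]'hc := by
  unfold pvLk
  rw [List.getD_eq_getElem g [] hr, List.getD_eq_getElem _ _ hc]

theorem pvLk_pvStep (g : List (List Bool)) (r c : Nat) (hr : r < g.length)
    (hc : c < (g.getD r []).length) :
    pvLk (pvStep g) r c
      = (pvLk g r c && decide ((4 : Int) ≤ pvCount g (r : Int) (c : Int))) := by
  have hgr : g.getD r [] = g[r]'hr := List.getD_eq_getElem g [] hr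
  have hc' : c < (g[r]'hr).length := by rwa [hgr] at hc
  have hrS : r < (pvStep g).length := by rw [length_pvStep]; exact hr
  have hcS : c < ((pvStep g)[r]'hrS).length := by
    have hlen : ((pvStep g)[r]'hrS).length = (g[r]'hr).length := by
      rw [pvStep_row g r hr]
      simp [PySem.List.length_enumerate]
    rw [hlen]
    exact hc'
  rw [pvLk_getElem (pvStep g) r c hrS hcS, pvLk_getElem g r c hr hc',
    List.getElem_of_eq (pvStep_row g r hr), List.getElem_map,
    PySem.List.getElem_enumerate]
  norm_num

theorem LeG_pvStep (g : List (List Bool)) : LeG (pvStep g) g := by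
  intro r c h
  obtain ⟨hr, hc⟩ := pvLk_bounds _ _ _ h
  have hrg : r < g.length := by rwa [length_pvStep] at hr
  have hcg : c < (g.getD r []).length := by
    have hrow : (pvStep g).getD r [] = (pvStep g)[r]'hr := List.getD_eq_getElem _ [] hr
    have hlen : ((pvStep g)[r]'hr).length = (g[r]'hrg).length := by
      rw [pvStep_row g r hrg]
      simp [PySem.List.length_enumerate]
    rw [hrow, hlen] at hc
    rwa [List.getD_eq_getElem g [] hrg]
  rw [pvLk_pvStep g r c hrg hcg] at h
  simp only [Bool.and_eq_true] at h
  exact h.1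

theorem pvStep_pvErode (g : List (List Bool)) : pvStep (pvErode g) = pvErode g := by
  suffices H : ∀ (N : Nat) (g : List (List Bool)), liveN g ≤ N →
      pvStep (pvErode g) = pvErode g from H (liveN g) g le_rfl
  intro N
  induction N with
  | zero =>
    intro g hN
    by_cases h : pvStep g = g
    · rw [pvErode]; simp [h]
    · have := liveN_pvStep_lt g h; omega
  | succ N ih =>
    intro g hN
    by_cases h : pvStep g = g
    · rw [pvErode]; simp [h]
    · have hlt := liveN_pvStep_lt g h
      have : pvErode g = pvErode (pvStep g) := by
        rw [pvErode]; simp [h]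
      rw [this]
      exact ih (pvStep g) (by omega)

theorem pvErode_le (g : List (List Bool)) : LeG (pvErode g) g := by
  suffices H : ∀ (N : Nat) (g : List (List Bool)), liveN g ≤ N →
      LeG (pvErode g) g from H (liveN g) g le_rfl
  intro N
  induction N with
  | zero =>
    intro g hN
    by_cases h : pvStep g = g
    · rw [pvErode]; simp [h]; exact fun _ _ hx => hx
    · have := liveN_pvStep_lt g h; omega
  | succ N ih =>
    intro g hN
    by_cases h : pvStep g = g
    · rw [pvErode]; simp [h]; exact fun _ _ hx => hx
    · have hlt := liveN_pvStep_lt g h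
      have he : pvErode g = pvErode (pvStep g) := by rw [pvErode]; simp [h]
      rw [he]
      intro r c hx
      exact LeG_pvStep g r c (ih (pvStep g) (by omega) r c hx)

theorem pvErode_shape (n m : Nat) (g : List (List Bool)) (hs : ShapeG n m g) :
    ShapeG n m (pvErode g) := by
  suffices H : ∀ (N : Nat) (g : List (List Bool)), liveN g ≤ N → ShapeG n m g →
      ShapeG n m (pvErode g) from H (liveN g) g le_rfl hs
  intro N
  induction N with
  | zero =>
    intro g hN hs
    by_cases h : pvStep g = g
    · rw [pvErode]; simp [h]; exact hs
    · have := liveN_pvStep_lt g h; omega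
  | succ N ih =>
    intro g hN hs
    by_cases h : pvStep g = g
    · rw [pvErode]; simp [h]; exact hs
    · have hlt := liveN_pvStep_lt g h
      have he : pvErode g = pvErode (pvStep g) := by rw [pvErode]; simp [h]
      rw [he]
      exact ih (pvStep g) (by omega) (pvStep_shape n m g hs)

theorem pvErode_closed (g : List (List Bool)) : ClosedG (pvErode g) := by
  intro r c h
  obtain ⟨hr, hc⟩ := pvLk_bounds _ _ _ h
  have hfix := pvStep_pvErode g
  have := pvLk_pvStep (pvErode g) r c hr hc
  rw [hfix, h] at this
  simp only [Bool.true_and] at this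
  exact of_decide_eq_true this.symm

theorem pvErode_max (A g : List (List Bool)) (hc : ClosedG A) (hl : LeG A g) :
    LeG A (pvErode g) := by
  suffices H : ∀ (N : Nat) (g : List (List Bool)), liveN g ≤ N → LeG A g →
      LeG A (pvErode g) from H (liveN g) g le_rfl hl
  intro N
  induction N with
  | zero =>
    intro g hN hl
    by_cases h : pvStep g = g
    · rw [pvErode]; simp [h]; exact hl
    · have := liveN_pvStep_lt g h; omega
  | succ N ih =>
    intro g hN hl
    by_cases h : pvStep g = g
    · rw [pvErode]; simp [h]; exact hl
    · have hlt := liveN_pvStep_lt g h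
      have he : pvErode g = pvErode (pvStep g) := by rw [pvErode]; simp [h]
      rw [he]
      apply ih (pvStep g) (by omega)
      -- A ≤ pvStep g
      intro r c hA
      have hg : pvLk g r c = true := hl r c hA
      obtain ⟨hr, hcb⟩ := pvLk_bounds _ _ _ hg
      rw [pvLk_pvStep g r c hr hcb, hg]
      simp only [Bool.true_and, decide_eq_true_eq]
      calc (4 : Int) ≤ pvCount A r c := hc r c hA
        _ ≤ pvCount g r c := pvCount_mono A g hl r c

theorem grid_eq_of (n m : Nat) (A B : List (List Bool)) (hA : ShapeG n m A)
    (hB : ShapeG n m B) (h : ∀ r c : Nat, pvLk A r c = pvLk B r c) : A = B := by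
  apply List.ext_getElem (by rw [hA.1, hB.1])
  intro r h1 h2
  apply List.ext_getElem
  · rw [hA.2 _ (List.getElem_mem h1), hB.2 _ (List.getElem_mem h2)]
  · intro c hc1 hc2
    rw [← pvLk_getElem A r c h1 hc1, ← pvLk_getElem B r c h2 hc2]
    exact h r c

theorem liveN_eq_of_mutual (n m : Nat) (A B : List (List Bool)) (hA : ShapeG n m A)
    (hB : ShapeG n m B) (h1 : LeG A B) (h2 : LeG B A) : A = B := by
  apply grid_eq_of n m A B hA hB
  intro r c
  cases hx : pvLk A r c
  · cases hy : pvLk B r c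
    · rfl
    · exact absurd (h2 r c hy) (by simp [hx])
  · exact (h1 r c hx).symm

-- membership in push-style folds
theorem foldl_mem_iff {α β : Type} (F : List β → α → List β) (New : α → β → Prop)
    (h : ∀ s e p, p ∈ F s e ↔ p ∈ s ∨ New e p) :
    ∀ (ds : List α) (st : List β) (p : β),
      p ∈ ds.foldl F st ↔ p ∈ st ∨ ∃ e ∈ ds, New e p := by
  intro ds
  induction ds with
  | nil => intro st p; simp
  | cons e tl ih =>
    intro st p
    rw [List.foldl_cons, ih (F st e) p, h st e p]
    simp only [List.mem_cons]
    constructor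
    · rintro ((hp | hn) | ⟨x, hx, hnx⟩)
      · exact Or.inl hp
      · exact Or.inr ⟨e, Or.inl rfl, hn⟩
      · exact Or.inr ⟨x, Or.inr hx, hnx⟩
    · rintro (hp | ⟨x, (rfl | hx), hnx⟩)
      · exact Or.inl (Or.inl hp)
      · exact Or.inl (Or.inr hnx)
      · exact Or.inr ⟨x, hx, hnx⟩

theorem mem_initStack (R C : Nat) (alive : List (List Bool)) (p : Int × Int) :
    p ∈ initStack R C alive
      ↔ ∃ r < R, ∃ c < C, pvLk alive r c = true ∧ p = ((r : Int), (c : Int)) := by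
  unfold initStack
  have hinner : ∀ (r : Nat) (st : List (Int × Int)) (p : Int × Int),
      p ∈ (List.range C).foldl (fun st c =>
          if pvLk alive r c = true then ((r : Int), (c : Int)) :: st else st) st
        ↔ p ∈ st ∨ ∃ c ∈ List.range C, pvLk alive r c = true ∧ p = ((r : Int), (c : Int)) := by
    intro r st p
    apply foldl_mem_iff
    intro s e q
    dsimp only
    split
    · rename_i hx
      simp only [List.mem_cons]
      constructor
      · rintro (rfl | hq)
        · exact Or.inr ⟨hx, rfl⟩
        · exact Or.inl hq
      · rintro (hq | ⟨_, rfl⟩)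
        · exact Or.inr hq
        · exact Or.inl rfl
    · rename_i hx
      simp [hx]
  rw [foldl_mem_iff
      (fun st r => (List.range C).foldl (fun st c =>
        if pvLk alive r c = true then ((r : Int), (c : Int)) :: st else st) st)
      (fun r q => ∃ c ∈ List.range C, pvLk alive r c = true ∧ q = ((r : Int), (c : Int)))
      (fun st r p => hinner r st p) (List.range R) [] p]
  simp

-- the invariant-carrying run of B's worklist loop
theorem loopB_nil_case (n m : Nat) (rolls E : List (List Bool))
    (hEsh : ShapeG n m E)
    (hmax : ∀ A, ClosedG A → LeG A rolls → LeG A E)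
    (alive : List (List Bool)) (removed : Int)
    (hsh : ShapeG n m alive) (hLeE : LeG E alive) (hLeR : LeG alive rolls)
    (hcomp : ∀ r c : Nat, pvLk alive r c = true →
        pvCount alive (r : Int) (c : Int) < 4 → False) (fuel : Nat) :
    loopB (fuel + 1) (n : Int) (m : Int) alive [] removed
      = removed + (liveN alive : Int) - (liveN E : Int) := by
  rw [loopB]
  have hcl : ClosedG alive := by
    intro r c h
    by_contra hx
    exact hcomp r c h (by omega)
  have heq : alive = E :=
    liveN_eq_of_mutual n m alive E hsh hEsh (hmax alive hcl hLeR) hLeE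
  rw [heq]
  ring

theorem loopB_main (n m : Nat) (rolls E : List (List Bool))
    (hEsh : ShapeG n m E) (hEcl : ClosedG E)
    (hmax : ∀ A, ClosedG A → LeG A rolls → LeG A E) :
    ∀ (fuel : Nat) (alive : List (List Bool)) (stack : List (Int × Int)) (removed : Int),
      9 * liveN alive + stack.length < fuel →
      ShapeG n m alive → LeG E alive → LeG alive rolls →
      (∀ p ∈ stack, ∃ r c : Nat, r < n ∧ c < m ∧ p = ((r : Int), (c : Int))) →
      (∀ r c : Nat, pvLk alive r c = true → pvCount alive (r : Int) (c : Int) < 4 →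
          ((r : Int), (c : Int)) ∈ stack) →
      loopB fuel (n : Int) (m : Int) alive stack removed
        = removed + (liveN alive : Int) - (liveN E : Int) := by
  intro fuel
  induction fuel with
  | zero =>
    intro alive stack removed hN
    omega
  | succ N ih =>
    intro alive stack removed hN hsh hLeE hLeR hrange hcomp
    cases stack with
    | nil =>
      exact loopB_nil_case n m rolls E hEsh hmax alive removed hsh hLeE hLeR
        (fun r c h1 h2 => by simpa using hcomp r c h1 h2) N
    | cons hd rest =>
      obtain ⟨rn, cn, hrn, hcn, hhd⟩ := hrange hd (List.mem_cons_self ..)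
      subst hhd
      rw [loopB]
      simp only [Int.toNat_natCast]
      by_cases hcd : pvLk alive rn cn = true
          ∧ pvDegree (n : Int) (m : Int) alive (rn : Int) (cn : Int) < 4
      · rw [if_pos hcd]
        have hlk := hcd.1
        have hdeg : pvCount alive (rn : Int) (cn : Int) < 4 := by
          rw [← pvDegree_eq n m alive hsh]
          exact hcd.2
        have hm := liveN_modify alive rn cn hlk
        set A' := alive.modify rn (fun row => row.set cn false) with hA'
        set S' := pushNbrs (n : Int) (m : Int) A' (rn : Int) (cn : Int) rest with hS'
        have hLkA' : ∀ r c : Nat,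
            pvLk A' r c = if r = rn ∧ c = cn then false else pvLk alive r c :=
          fun r c => pvLk_modify_set alive rn cn r c
        have hshA' : ShapeG n m A' := by
          constructor
          · rw [hA', List.length_modify]
            exact hsh.1
          · intro row hrow
            rcases List.mem_iff_getElem.mp hrow with ⟨i, hi, rfl⟩
            simp only [hA', List.getElem_modify]
            split
            · rw [List.length_set]
              exact hsh.2 _ (List.getElem_mem _)
            · exact hsh.2 _ (List.getElem_mem _)
        have hLeA' : LeG A' alive := by
          intro r c h
          rw [hLkA'] at h
          split at h
          · exact absurd h (by simp)
          · exact h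
        have hLeE' : LeG E A' := by
          intro r c h
          rw [hLkA']
          split
          · rename_i hx
            exfalso
            obtain ⟨rfl, rfl⟩ := hx
            have h4 := hEcl r c h
            have h5 := pvCount_mono E alive hLeE (r : Int) (c : Int)
            omega
          · exact hLeE r c h
        have hLeR' : LeG A' rolls := fun r c h => hLeR r c (hLeA' r c h)
        have hmemS' : ∀ p, p ∈ S' ↔ p ∈ rest ∨ ∃ e ∈ pvDeltas,
            (0 ≤ (rn : Int) + e.1 ∧ (rn : Int) + e.1 < (n : Int) ∧
              0 ≤ (cn : Int) + e.2 ∧ (cn : Int) + e.2 < (m : Int) ∧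
              pvLk A' ((rn : Int) + e.1).toNat ((cn : Int) + e.2).toNat = true) ∧
            p = ((rn : Int) + e.1, (cn : Int) + e.2) := by
          intro p
          rw [hS']
          unfold pushNbrs
          refine foldl_mem_iff _
            (fun e q => (0 ≤ (rn : Int) + e.1 ∧ (rn : Int) + e.1 < (n : Int) ∧
              0 ≤ (cn : Int) + e.2 ∧ (cn : Int) + e.2 < (m : Int) ∧
              pvLk A' ((rn : Int) + e.1).toNat ((cn : Int) + e.2).toNat = true) ∧
              q = ((rn : Int) + e.1, (cn : Int) + e.2)) ?_ pvDeltas rest p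
          intro s e q
          dsimp only
          split
          · rename_i hx
            simp only [List.mem_cons]
            constructor
            · rintro (rfl | hq)
              · exact Or.inr ⟨hx, rfl⟩
              · exact Or.inl hq
            · rintro (hq | ⟨_, rfl⟩)
              · exact Or.inr hq
              · exact Or.inl rfl
          · rename_i hx
            simp [hx]
        have hlen : S'.length ≤ rest.length + 8 := by
          rw [hS']
          exact pushNbrs_len _ _ _ _ _ _
        have hrange' : ∀ p ∈ S', ∃ r c : Nat, r < n ∧ c < m ∧ p = ((r : Int), (c : Int)) := by
          intro p hp
          rw [hmemS'] at hp
          rcases hp with hp | ⟨e, _, ⟨h1, h2, h3, h4, _⟩, rfl⟩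
          · exact hrange p (List.mem_cons_of_mem _ hp)
          · refine ⟨((rn : Int) + e.1).toNat, ((cn : Int) + e.2).toNat, by omega, by omega, ?_⟩
            rw [Int.toNat_of_nonneg h1, Int.toNat_of_nonneg h3]
        have hcomp' : ∀ x y : Nat, pvLk A' x y = true →
            pvCount A' (x : Int) (y : Int) < 4 → ((x : Int), (y : Int)) ∈ S' := by
          intro x y hx hcx
          have hxne : ¬(x = rn ∧ y = cn) := by
            intro hxy
            rw [hLkA', if_pos hxy] at hx
            simp at hx
          have hxa : pvLk alive x y = true := by
            rw [hLkA', if_neg hxne] at hx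
            exact hx
          by_cases hold : pvCount alive (x : Int) (y : Int) < 4
          · rcases List.mem_cons.mp (hcomp x y hxa hold) with heq | hmem
            · exfalso
              injection heq with e1 e2
              exact hxne ⟨by exact_mod_cast e1, by exact_mod_cast e2⟩
            · rw [hmemS']
              exact Or.inl hmem
          · have hne : ∃ d ∈ pvDeltas, (x : Int) + d.1 = (rn : Int)
                ∧ (y : Int) + d.2 = (cn : Int) := by
              by_contra hno
              push_neg at hno
              have hsame := pvCount_modify_eq alive rn cn (x : Int) (y : Int) (by
                intro d hd hcontra
                exact hno d hd hcontra.1 hcontra.2)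
              rw [← hA'] at hsame
              omega
            obtain ⟨d, hd, hd1, hd2⟩ := hne
            have hneg : ((-d.1, -d.2) : Int × Int) ∈ pvDeltas :=
              (by decide : ∀ d ∈ pvDeltas, ((-d.1, -d.2) : Int × Int) ∈ pvDeltas) d hd
            obtain ⟨hbx, hby⟩ := pvLk_bounds _ _ _ hx
            have hbx' : x < n := by rw [hshA'.1] at hbx; exact hbx
            have hby' : y < m := by
              rwa [shape_row_len n m A' hshA' x hbx'] at hby
            have e1 : (rn : Int) + -d.1 = (x : Int) := by omega
            have e2 : (cn : Int) + -d.2 = (y : Int) := by omega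
            rw [hmemS']
            right
            refine ⟨(-d.1, -d.2), hneg, ⟨by omega, by omega, by omega, by omega, ?_⟩, ?_⟩
            · rw [show ((-d.1, -d.2) : Int × Int).1 = -d.1 from rfl,
                show ((-d.1, -d.2) : Int × Int).2 = -d.2 from rfl, e1, e2,
                Int.toNat_natCast, Int.toNat_natCast]
              exact hx
            · rw [show ((-d.1, -d.2) : Int × Int).1 = -d.1 from rfl,
                show ((-d.1, -d.2) : Int × Int).2 = -d.2 from rfl, e1, e2]
        have hNle : 9 * liveN A' + S'.length < N := by
          simp only [List.length_cons] at hN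
          omega
        rw [ih A' S' (removed + 1) hNle hshA' hLeE' hLeR' hrange' hcomp']
        have hcast : (liveN A' : Int) + 1 = (liveN alive : Int) := by exact_mod_cast hm
        omega
      · rw [if_neg hcd]
        have hcomp' : ∀ x y : Nat, pvLk alive x y = true →
            pvCount alive (x : Int) (y : Int) < 4 → ((x : Int), (y : Int)) ∈ rest := by
          intro x y h1 h2
          rcases List.mem_cons.mp (hcomp x y h1 h2) with heq | hmem
          · exfalso
            injection heq with e1 e2
            have hx : x = rn := by exact_mod_cast e1
            have hy : y = cn := by exact_mod_cast e2
            subst hx; subst hy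
            exact hcd ⟨h1, by rw [pvDegree_eq n m alive hsh]; exact h2⟩
          · exact hmem
        exact ih alive rest removed (by simp only [List.length_cons] at hN; omega)
          hsh hLeE hLeR (fun p hp => hrange p (List.mem_cons_of_mem _ hp)) hcomp'

theorem alt_eq (rolls : List (List Bool)) (hrect : Pre_part2 rolls) :
    part2_alt rolls = (liveN rolls : Int) - (liveN (pvErode rolls) : Int) := by
  have hsh : ShapeG rolls.length (rolls.getD 0 []).length rolls := ⟨rfl, hrect⟩
  have h := loopB_main rolls.length (rolls.getD 0 []).length rolls (pvErode rolls)
    (pvErode_shape _ _ rolls hsh) (pvErode_closed rolls)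
    (fun A hc hl => pvErode_max A rolls hc hl)
    (9 * liveN rolls + (initStack rolls.length (rolls.getD 0 []).length rolls).length + 1)
    rolls (initStack rolls.length (rolls.getD 0 []).length rolls) 0
    (by omega) hsh (pvErode_le rolls) (fun _ _ hx => hx)
    (by
      intro p hp
      rw [mem_initStack] at hp
      obtain ⟨r, hr, c, hc, _, rfl⟩ := hp
      exact ⟨r, c, hr, hc, rfl⟩)
    (by
      intro r c h1 _
      rw [mem_initStack]
      obtain ⟨hb1, hb2⟩ := pvLk_bounds _ _ _ h1
      exact ⟨r, hb1, c, by rwa [shape_row_len _ _ rolls hsh r hb1] at hb2, h1, rfl⟩)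
  unfold part2_alt
  rw [h]
  ring

-- ===== VERDICT (by name: the statement is the Claim_ definition above) =====
theorem part2_spec : Claim_equal_part2 := by
  intro rolls _ hpre
  unfold Spec_part2 part2
  have hA := main_loop (liveN rolls + 1) rolls hpre (by omega) 0
  have hB := alt_eq rolls hpre
  rw [hA, hB, pvLive_eq, pvLive_eq]
  ring
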